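-- pv_equiv track=rewrite | github.com/matandro/RNAsfbinv | rnafbinv/RNAfbinvCL.py | is_valid_structure
-- ===== SOURCE A (Python) =====
-- def is_valid_structure(structure):
--     bracket_count = 0
--     for c in structure:
--         if c == '(':
--             bracket_count += 1
--         elif c == ')':
--             bracket_count -= 1
--             if bracket_count < 0:
--                 return False
--         elif c != '.':
--             return False
--     return bracket_count == 0
-- ===== SOURCE B (Python) =====
-- def is_valid_structure(structure):
--     for c in structure:
--         if c not in '().':
--             return False
--     s = structure.replace('.', '')
--     while '()' in s:
--         s = s.replace('()', '')
--     return s == ''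
-- ===== Notes on version B (the rewrite author's own statement) =====
-- stated objective: alternative
-- what changed: Replaces A's single-pass running open-bracket counter with iterative elimination: strip the dots, then repeatedly delete adjacent matched bracket pairs and test whether the string reduces to empty.
import Mathlib
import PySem

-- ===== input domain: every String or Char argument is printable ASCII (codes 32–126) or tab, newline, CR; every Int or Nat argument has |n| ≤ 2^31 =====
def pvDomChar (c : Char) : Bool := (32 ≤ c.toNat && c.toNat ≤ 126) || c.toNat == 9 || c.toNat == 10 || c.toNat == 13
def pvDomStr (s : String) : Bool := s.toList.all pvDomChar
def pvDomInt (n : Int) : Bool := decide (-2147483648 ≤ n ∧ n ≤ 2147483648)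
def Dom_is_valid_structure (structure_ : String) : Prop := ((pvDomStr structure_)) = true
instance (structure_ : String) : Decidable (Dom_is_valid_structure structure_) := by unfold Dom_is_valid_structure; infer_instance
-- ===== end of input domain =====

-- B replaces A's running open-bracket counter with iterative elimination of adjacent "()"
-- pairs (after stripping dots); an alternative algorithm of the same value, not faster.

-- ===== PORT A =====
-- the for-loop of A with its accumulator bracket_count; early `return False` = returning false
def pvA_loop : List Char → Int → Bool
  | [], n => n == 0
  | c :: rest, n =>
    if c = '(' then pvA_loop rest (n + 1)
    else if c = ')' then
      (if n - 1 < 0 then false else pvA_loop rest (n - 1))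
    else if c ≠ '.' then false
    else pvA_loop rest n

def is_valid_structure (structure_ : String) : Bool := pvA_loop structure_.toList 0

-- ===== PORT B =====
-- B's first loop: `if c not in '().': return False`
def pvB_valid : List Char → Bool
  | [] => true
  | c :: rest => if c ∈ ['(', ')', '.'] then pvB_valid rest else false

-- structure.replace('.', '') — exact: removes every '.' (single-char pattern)
def pvB_removeDots : List Char → List Char
  | [] => []
  | c :: rest => if c = '.' then pvB_removeDots rest else c :: pvB_removeDots rest

-- `'()' in s` — exact substring test for the two-char pattern
def pvB_hasPair : List Char → Bool
  | '(' :: ')' :: _ => true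
  | _ :: rest => pvB_hasPair rest
  | [] => false

-- s.replace('()', '') — exact: removes the non-overlapping occurrences left to right
def pvB_replacePairs : List Char → List Char
  | '(' :: ')' :: rest => pvB_replacePairs rest
  | c :: rest => c :: pvB_replacePairs rest
  | [] => []

-- termination measure for the while-loop (cited by pvB_elim's decreasing_by)
theorem pvB_replacePairs_length_le (s : List Char) :
    (pvB_replacePairs s).length ≤ s.length := by
  induction s using pvB_replacePairs.induct with
  | case1 rest ih => simp [pvB_replacePairs]; omega
  | case2 c rest _h ih => simp [pvB_replacePairs]; omega
  | case3 => simp [pvB_replacePairs]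

theorem pvB_replacePairs_length_lt (s : List Char) (h : pvB_hasPair s = true) :
    (pvB_replacePairs s).length < s.length := by
  induction s using pvB_replacePairs.induct with
  | case1 rest ih =>
    have := pvB_replacePairs_length_le rest
    simp [pvB_replacePairs]; omega
  | case2 c rest h2 ih =>
    have h' : pvB_hasPair rest = true := by
      cases rest with
      | nil => simp [pvB_hasPair] at h
      | cons d tl =>
        by_cases hc : c = '('
        · by_cases hd : d = ')'
          · exact ((h2 tl hc (by rw [hd])).elim)
          · subst hc; simpa [pvB_hasPair, hd] using h
        · simpa [pvB_hasPair, hc] using h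
    have := ih h'
    simp [pvB_replacePairs]
    omega
  | case3 => simp [pvB_hasPair] at h

-- the while-loop: while '()' in s: s = s.replace('()', '')
def pvB_elim (s : List Char) : List Char :=
  if h : pvB_hasPair s = true then pvB_elim (pvB_replacePairs s) else s
termination_by s.length
decreasing_by exact pvB_replacePairs_length_lt s h

def is_valid_structure_alt (structure_ : String) : Bool :=
  pvB_valid structure_.toList &&
    (pvB_elim (pvB_removeDots structure_.toList) == [])

-- ===== PRECONDITION & SPEC =====
def Spec_is_valid_structure (structure_ : String) (out : Bool) : Prop := out = is_valid_structure_alt structure_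
instance (structure_ : String) (out : Bool) : Decidable (Spec_is_valid_structure structure_ out) := by unfold Spec_is_valid_structure; infer_instance

-- ===== CLAIM (what is proved, stated in full; the proofs are below) =====
def Claim_equal_is_valid_structure : Prop := ∀ (structure_ : String), Dom_is_valid_structure structure_ → Spec_is_valid_structure structure_ (is_valid_structure structure_)

-- ===== LEMMAS AND PROOFS =====

/-- +1 for '(', -1 for ')', 0 otherwise. -/
def pvDelta (c : Char) : Int := if c = '(' then 1 else if c = ')' then -1 else 0

/-- total balance of the string -/
def pvTot : List Char → Int
  | [] => 0
  | c :: r => pvDelta c + pvTot r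

/-- minimum balance over all prefixes -/
def pvMin : List Char → Int
  | [] => 0
  | c :: r => min 0 (pvDelta c + pvMin r)

theorem pvMin_nonpos (l : List Char) : pvMin l ≤ 0 := by
  cases l <;> simp [pvMin]

/-- characterisation of A's loop -/
theorem pvA_loop_iff (l : List Char) (n : Int) (hn : 0 ≤ n) :
    (pvA_loop l n = true ↔ (pvB_valid l = true ∧ -n ≤ pvMin l ∧ n + pvTot l = 0)) := by
  induction l generalizing n with
  | nil =>
    simp [pvA_loop, pvB_valid, pvMin, pvTot]
    omega
  | cons c r ih =>
    by_cases h1 : c = '('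
    · subst h1
      rw [show pvA_loop ('(' :: r) n = pvA_loop r (n + 1) from rfl,
        show pvB_valid ('(' :: r) = pvB_valid r from rfl,
        show pvMin ('(' :: r) = min 0 (1 + pvMin r) from rfl,
        show pvTot ('(' :: r) = 1 + pvTot r from rfl,
        ih (n + 1) (by omega)]
      constructor <;> (rintro ⟨hv, hm, ht⟩; exact ⟨hv, by omega, by omega⟩)
    · by_cases h2 : c = ')'
      · subst h2
        rw [show pvA_loop (')' :: r) n
              = (if n - 1 < 0 then false else pvA_loop r (n - 1)) from rfl,
          show pvB_valid (')' :: r) = pvB_valid r from rfl,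
          show pvMin (')' :: r) = min 0 (-1 + pvMin r) from rfl,
          show pvTot (')' :: r) = -1 + pvTot r from rfl]
        by_cases hz : n - 1 < 0
        · rw [if_pos hz]
          have := pvMin_nonpos r
          simp only [Bool.false_eq_true, false_iff]
          rintro ⟨hv, hm, ht⟩
          omega
        · rw [if_neg hz, ih (n - 1) (by omega)]
          constructor <;> (rintro ⟨hv, hm, ht⟩; exact ⟨hv, by omega, by omega⟩)
      · by_cases h3 : c = '.'
        · subst h3
          rw [show pvA_loop ('.' :: r) n = pvA_loop r n from rfl,
            show pvB_valid ('.' :: r) = pvB_valid r from rfl,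
            show pvMin ('.' :: r) = min 0 (0 + pvMin r) from rfl,
            show pvTot ('.' :: r) = 0 + pvTot r from rfl,
            ih n hn]
          have := pvMin_nonpos r
          constructor <;> (rintro ⟨hv, hm, ht⟩; exact ⟨hv, by omega, by omega⟩)
        · simp [pvA_loop, pvB_valid, h1, h2, h3]

/-- only-brackets predicate (used to describe the state of B's while-loop) -/
def pvBr (l : List Char) : Bool := l.all (fun c => c == '(' || c == ')')

theorem pvTot_replacePairs (s : List Char) : pvTot (pvB_replacePairs s) = pvTot s := by
  induction s using pvB_replacePairs.induct with
  | case1 rest ih => simp [pvB_replacePairs, pvTot, pvDelta, ih]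
  | case2 c rest h ih => simp [pvB_replacePairs, pvTot, ih]
  | case3 => rfl

theorem pvMin_replacePairs (s : List Char) : pvMin (pvB_replacePairs s) = pvMin s := by
  induction s using pvB_replacePairs.induct with
  | case1 rest ih =>
    have := pvMin_nonpos rest
    rw [show pvB_replacePairs ('(' :: ')' :: rest) = pvB_replacePairs rest from rfl, ih,
      show pvMin ('(' :: ')' :: rest) = min 0 (1 + min 0 (-1 + pvMin rest)) from rfl]
    omega
  | case2 c rest h ih => simp [pvB_replacePairs, pvMin, ih]
  | case3 => rfl

theorem pvBr_replacePairs (s : List Char) (h : pvBr s = true) :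
    pvBr (pvB_replacePairs s) = true := by
  induction s using pvB_replacePairs.induct with
  | case1 rest ih =>
    simp only [pvBr, List.all_cons, Bool.and_eq_true] at h
    simpa [pvB_replacePairs] using ih h.2.2
  | case2 c rest h2 ih =>
    simp only [pvBr, List.all_cons, Bool.and_eq_true] at h
    have hr := ih h.2
    simp only [pvB_replacePairs, pvBr, List.all_cons, Bool.and_eq_true]
    exact ⟨h.1, hr⟩
  | case3 => rfl

/-- a bracket-only string with no adjacent "()" is some ")"s followed by some "("s -/
theorem pvNoPair_shape (s : List Char) (hb : pvBr s = true) (hp : pvB_hasPair s = false) :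
    ∃ a b, s = List.replicate a ')' ++ List.replicate b '(' := by
  induction s with
  | nil => exact ⟨0, 0, rfl⟩
  | cons c r ih =>
    simp [pvBr] at hb
    rcases hb with ⟨hc, hr⟩
    rcases hc with hc | hc
    · -- c = '('
      subst hc
      have hr' : pvB_hasPair r = false := by
        cases r with
        | nil => rfl
        | cons d tl =>
          by_cases hd : d = ')'
          · subst hd; simp [pvB_hasPair] at hp
          · rw [show pvB_hasPair ('(' :: d :: tl) = pvB_hasPair (d :: tl) by
              simp [pvB_hasPair, hd]] at hp
            exact hp
      obtain ⟨a, b, habr⟩ := ih (by simpa [pvBr] using hr) hr'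
      -- r cannot start with ')': a = 0
      cases a with
      | zero => exact ⟨0, b + 1, by simp [habr, List.replicate_succ]⟩
      | succ a' =>
        exfalso
        rw [habr] at hp
        simp [List.replicate_succ, pvB_hasPair] at hp
    · -- c = ')'
      subst hc
      have hr' : pvB_hasPair r = false := by
        cases r with
        | nil => rfl
        | cons d tl => simpa [pvB_hasPair] using hp
      obtain ⟨a, b, habr⟩ := ih (by simpa [pvBr] using hr) hr'
      exact ⟨a + 1, b, by simp [habr, List.replicate_succ]⟩

theorem pvTot_opens (b : Nat) : pvTot (List.replicate b '(') = (b : Int) := by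
  induction b with
  | zero => rfl
  | succ b ih => simp [List.replicate_succ, pvTot, pvDelta, ih]; omega

theorem pvMin_opens (b : Nat) : pvMin (List.replicate b '(') = 0 := by
  induction b with
  | zero => rfl
  | succ b ih => simp [List.replicate_succ, pvMin, pvDelta, ih]

theorem pvTot_shape (a b : Nat) :
    pvTot (List.replicate a ')' ++ List.replicate b '(') = (b : Int) - (a : Int) := by
  induction a with
  | zero => simp [pvTot_opens]
  | succ a ih => simp [List.replicate_succ, pvTot, pvDelta, ih]; omega

theorem pvMin_shape (a b : Nat) :
    pvMin (List.replicate a ')' ++ List.replicate b '(') = -(a : Int) := by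
  induction a with
  | zero => simp [pvMin_opens]
  | succ a ih => simp [List.replicate_succ, pvMin, pvDelta, ih]

/-- B's while-loop empties the string exactly when the bracket string is balanced -/
theorem pvElim_empty (s : List Char) (hb : pvBr s = true) :
    (pvB_elim s = [] ↔ (0 ≤ pvMin s ∧ pvTot s = 0)) := by
  induction s using pvB_elim.induct with
  | case1 s h ih =>
    rw [pvB_elim, dif_pos h, ih (pvBr_replacePairs s hb), pvMin_replacePairs,
      pvTot_replacePairs]
  | case2 s h =>
    rw [pvB_elim, dif_neg h]
    obtain ⟨a, b, hs⟩ := pvNoPair_shape s hb (by simpa using h)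
    subst hs
    rw [pvMin_shape, pvTot_shape]
    constructor
    · intro he
      simp at he
      simp [he]
    · rintro ⟨h1, h2⟩
      have ha : a = 0 := by omega
      have hbb : b = 0 := by omega
      simp [ha, hbb]

theorem pvTot_removeDots (l : List Char) : pvTot (pvB_removeDots l) = pvTot l := by
  induction l with
  | nil => rfl
  | cons c r ih =>
    by_cases hc : c = '.'
    · subst hc; simp [pvB_removeDots, pvTot, pvDelta, ih]
    · simp [pvB_removeDots, hc, pvTot, ih]

theorem pvMin_removeDots (l : List Char) : pvMin (pvB_removeDots l) = pvMin l := by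
  induction l with
  | nil => rfl
  | cons c r ih =>
    by_cases hc : c = '.'
    · subst hc
      have := pvMin_nonpos r
      simp [pvB_removeDots, pvMin, pvDelta, ih]
      omega
    · simp [pvB_removeDots, hc, pvMin, ih]

theorem pvBr_removeDots (l : List Char) (h : pvB_valid l = true) :
    pvBr (pvB_removeDots l) = true := by
  induction l with
  | nil => rfl
  | cons c r ih =>
    have hm : c ∈ ['(', ')', '.'] := by
      by_cases hm : c ∈ ['(', ')', '.']
      · exact hm
      · simp [pvB_valid, hm] at h
    have hr : pvB_valid r = true := by simpa [pvB_valid, hm] using h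
    have hbr := ih hr
    by_cases hd : c = '.'
    · subst hd; simpa [pvB_removeDots] using hbr
    · simp only [List.mem_cons, List.not_mem_nil, or_false] at hm
      rw [show pvB_removeDots (c :: r) = c :: pvB_removeDots r by simp [pvB_removeDots, hd]]
      simp only [pvBr, List.all_cons, Bool.and_eq_true]
      refine ⟨?_, hbr⟩
      rcases hm with h1 | h1 | h1
      · simp [h1]
      · simp [h1]
      · exact absurd h1 hd

-- ===== VERDICT (by name: the statement is the Claim_ definition above) =====
theorem is_valid_structure_spec : Claim_equal_is_valid_structure := by
  intro s _
  unfold Spec_is_valid_structure is_valid_structure is_valid_structure_alt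
  rw [Bool.eq_iff_iff]
  rw [pvA_loop_iff s.toList 0 le_rfl]
  simp only [Bool.and_eq_true, beq_iff_eq]
  by_cases hv : pvB_valid s.toList = true
  · rw [pvElim_empty _ (pvBr_removeDots _ hv), pvMin_removeDots, pvTot_removeDots]
    constructor
    · rintro ⟨_, hm, ht⟩; exact ⟨hv, by omega, by omega⟩
    · rintro ⟨_, hm, ht⟩; exact ⟨hv, by omega, by omega⟩
  · simp [hv]
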